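-- pv_equiv track=rewrite | github.com/tkhahns/multimodal-data-pipeline | packages/nlp_models/nlp_models/emotion/meld_emotion_analyzer.py | _analyze_emotion_shifts
-- ===== SOURCE A (Python) =====
-- from typing import Dict, List, Tuple, Any
--
-- def _analyze_emotion_shifts(utterances: List[Dict]) -> Dict[str, Any]:
--     """Analyze emotion transitions and shifts in the conversation."""
--     features = {}
--
--     # Count emotion shifts
--     emotion_shifts = 0
--     for i in range(1, len(utterances)):
--         prev_emotion = utterances[i-1]['dominant_emotion']
--         curr_emotion = utterances[i]['dominant_emotion']
--         if prev_emotion != curr_emotion: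
--             emotion_shifts += 1
--
--     features['MELD_num_emotion_shift'] = emotion_shifts
--
--     return features
-- ===== SOURCE B (Python) =====
-- from itertools import groupby
-- from typing import Dict, List, Any
--
--
-- def _analyze_emotion_shifts(utterances: List[Dict]) -> Dict[str, Any]:
--     """Analyze emotion transitions and shifts in the conversation."""
--     if len(utterances) <= 1:
--         return {'MELD_num_emotion_shift': 0}
--     emotions = [u['dominant_emotion'] for u in utterances]
--     num_runs = sum(1 for _ in groupby(emotions))
--     return {'MELD_num_emotion_shift': num_runs - 1}
-- ===== Notes on version B (the rewrite author's own statement) =====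
-- stated objective: idiomatic
-- what changed: Replaces the index-based adjacent-pair loop with a groupby run-length count: the number of shifts is the number of emotion runs minus one.
import Mathlib
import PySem

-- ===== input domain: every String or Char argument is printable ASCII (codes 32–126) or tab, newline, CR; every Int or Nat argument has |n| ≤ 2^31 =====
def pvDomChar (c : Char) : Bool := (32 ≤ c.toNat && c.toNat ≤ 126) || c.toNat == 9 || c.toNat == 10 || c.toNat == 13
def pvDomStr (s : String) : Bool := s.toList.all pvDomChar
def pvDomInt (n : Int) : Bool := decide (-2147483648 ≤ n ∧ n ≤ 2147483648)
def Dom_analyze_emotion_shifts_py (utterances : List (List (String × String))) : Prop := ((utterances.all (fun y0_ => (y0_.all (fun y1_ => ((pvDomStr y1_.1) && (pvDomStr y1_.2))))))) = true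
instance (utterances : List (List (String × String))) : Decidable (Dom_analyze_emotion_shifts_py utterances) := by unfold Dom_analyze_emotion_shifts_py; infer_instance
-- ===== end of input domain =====

-- B replaces A's index-based adjacent-pair loop by a run-length (groupby) count: shifts = runs - 1 (idiomatic, same cost).


-- ===== PORT A =====
-- u['dominant_emotion'] is ported via Dict.getD; the KeyError inputs are excluded by Pre_ below,
-- and list indexing i-1, i is always in range, so pyGetD's default is never reached inside Pre_.
def analyze_emotion_shifts_py (utterances : List (List (String × String))) : List (String × Int) :=
  let features : PySem.Dict String Int := PySem.Dict.empty
  let emotion_shifts : Int :=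
    (PySem.List.pyRange 1 (utterances.length : Int) 1).foldl (fun acc i =>
      let prev_emotion := (PySem.Dict.mk (PySem.List.pyGetD utterances (i - 1) [])).getD "dominant_emotion" ""
      let curr_emotion := (PySem.Dict.mk (PySem.List.pyGetD utterances i [])).getD "dominant_emotion" ""
      if prev_emotion ≠ curr_emotion then acc + 1 else acc) 0
  (features.insert "MELD_num_emotion_shift" emotion_shifts).items

-- ===== PORT B =====
-- sum(1 for _ in groupby(emotions)): number of maximal runs of equal adjacent elements
def pvRuns : List String → Int
  | [] => 0
  | [_] => 1
  | a :: b :: t => (if a = b then 0 else 1) + pvRuns (b :: t)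

def analyze_emotion_shifts_py_alt (utterances : List (List (String × String))) : List (String × Int) :=
  if utterances.length ≤ 1 then [("MELD_num_emotion_shift", 0)]
  else
    let emotions := utterances.map (fun u => (PySem.Dict.mk u).getD "dominant_emotion" "")
    [("MELD_num_emotion_shift", pvRuns emotions - 1)]

-- ===== PRECONDITION & SPEC =====
-- Pre_ excludes exactly the inputs where Python A raises KeyError: with ≥ 2 utterances, A reads
-- 'dominant_emotion' from every utterance; with ≤ 1 utterance A reads nothing and returns.
def Pre_analyze_emotion_shifts_py (utterances : List (List (String × String))) : Prop :=
  utterances.length ≤ 1 ∨ ∀ u ∈ utterances, ((PySem.Dict.mk u).get? "dominant_emotion").isSome = true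
instance (utterances : List (List (String × String))) : Decidable (Pre_analyze_emotion_shifts_py utterances) := by unfold Pre_analyze_emotion_shifts_py; infer_instance

def pvWitness_analyze_emotion_shifts_py : (List (List (String × String))) :=
  [[("dominant_emotion", "joy")], [("dominant_emotion", "anger")], [("dominant_emotion", "anger")]]

def Spec_analyze_emotion_shifts_py (utterances : List (List (String × String))) (out : List (String × Int)) : Prop := out = analyze_emotion_shifts_py_alt utterances
instance (utterances : List (List (String × String))) (out : List (String × Int)) : Decidable (Spec_analyze_emotion_shifts_py utterances out) := by unfold Spec_analyze_emotion_shifts_py; infer_instance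

-- ===== CLAIM (what is proved, stated in full; the proofs are below) =====
def Claim_equal_analyze_emotion_shifts_py : Prop := ∀ (utterances : List (List (String × String))), Dom_analyze_emotion_shifts_py utterances → Pre_analyze_emotion_shifts_py utterances → Spec_analyze_emotion_shifts_py utterances (analyze_emotion_shifts_py utterances)

-- ===== LEMMAS AND PROOFS =====

-- emotion of utterance u, shared shape of both ports' lookups
def pvEmo (u : List (String × String)) : String := (PySem.Dict.mk u).getD "dominant_emotion" ""

-- appending one element to a nonempty list adds 1 to pvRuns iff the last element changes
theorem pvRuns_append (l : List String) (x : String) (h : l ≠ []) :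
    pvRuns (l ++ [x]) = pvRuns l + (if l.getLast h = x then 0 else 1) := by
  induction l with
  | nil => exact absurd rfl h
  | cons a t ih =>
    cases t with
    | nil => simp [pvRuns]; split_ifs <;> simp
    | cons b t' =>
      simp only [List.cons_append, pvRuns]
      have h2 := ih (by simp)
      rw [List.cons_append] at h2
      rw [h2, List.getLast_cons (List.cons_ne_nil b t')]
      ring

-- A's indexed fold over range(1, len) counts the adjacent changes = pvRuns - 1
theorem pvFoldA (l : List (List (String × String))) (h : l ≠ []) :
    (PySem.List.pyRange 1 (l.length : Int) 1).foldl (fun acc i =>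
      if (PySem.Dict.mk (PySem.List.pyGetD l (i - 1) [])).getD "dominant_emotion" ""
          ≠ (PySem.Dict.mk (PySem.List.pyGetD l i [])).getD "dominant_emotion" "" then acc + 1 else acc) 0
      = pvRuns (l.map pvEmo) - 1 := by
  induction l using List.reverseRecOn with
  | nil => exact absurd rfl h
  | append_singleton l x ih =>
    by_cases hl : l = []
    · subst hl
      have h0 : PySem.List.pyRange 1 ((([] : List (List (String × String))) ++ [x]).length : Int) 1 = [] :=
        PySem.List.pyRange_one_eq_nil (by simp)
      rw [h0]
      simp [pvRuns, pvEmo]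
    · have hlne : l ≠ [] := hl
      have hlen1 : 1 ≤ (l.length : Int) := by
        have : 0 < l.length := List.length_pos_iff.mpr hlne
        omega
      have hlenapp : ((l ++ [x]).length : Int) = (l.length : Int) + 1 := by
        simp
      rw [hlenapp, PySem.List.pyRange_one_succ_right hlen1, List.foldl_append]
      -- inner fold over pyRange 1 len only touches indices < l.length, where l ++ [x] agrees with l
      have hcongr :
          (PySem.List.pyRange 1 (l.length : Int) 1).foldl (fun acc i =>
            if (PySem.Dict.mk (PySem.List.pyGetD (l ++ [x]) (i - 1) [])).getD "dominant_emotion" ""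
                ≠ (PySem.Dict.mk (PySem.List.pyGetD (l ++ [x]) i [])).getD "dominant_emotion" "" then acc + 1 else acc) (0 : Int)
          = (PySem.List.pyRange 1 (l.length : Int) 1).foldl (fun acc i =>
            if (PySem.Dict.mk (PySem.List.pyGetD l (i - 1) [])).getD "dominant_emotion" ""
                ≠ (PySem.Dict.mk (PySem.List.pyGetD l i [])).getD "dominant_emotion" "" then acc + 1 else acc) (0 : Int) := by
        apply PySem.List.foldl_congr_mem
        intro acc i hi
        have hmem := (PySem.List.mem_pyRange_one).mp hi
        have hget1 : PySem.List.pyGetD (l ++ [x]) (i - 1) [] = PySem.List.pyGetD l (i - 1) [] := by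
          rw [PySem.List.pyGetD_eq_getElem (l ++ [x]) [] (by omega) (by simp; omega),
              PySem.List.pyGetD_eq_getElem l [] (by omega) (by omega),
              List.getElem_append_left]
        have hget2 : PySem.List.pyGetD (l ++ [x]) i [] = PySem.List.pyGetD l i [] := by
          rw [PySem.List.pyGetD_eq_getElem (l ++ [x]) [] (by omega) (by simp; omega),
              PySem.List.pyGetD_eq_getElem l [] (by omega) (by omega),
              List.getElem_append_left]
        rw [hget1, hget2]
      rw [hcongr, ih hlne]
      -- last step of the fold: index l.length, comparing last of l with x
      have hgetlast : PySem.List.pyGetD (l ++ [x]) ((l.length : Int) - 1) [] = l.getLast hlne := by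
        have hidx : ((l.length : Int) - 1).toNat = l.length - 1 := by omega
        rw [PySem.List.pyGetD_eq_getElem (l ++ [x]) []
              (by omega)
              (by simp only [List.length_append, List.length_singleton]; push_cast; omega)]
        rw [List.getElem_append_left (by omega)]
        simp only [hidx, List.getLast_eq_getElem]
      have hgetx : PySem.List.pyGetD (l ++ [x]) (l.length : Int) [] = x := by
        rw [PySem.List.pyGetD_natCast]
        simp [List.getD_eq_getElem?_getD]
      simp only [List.foldl_cons, List.foldl_nil]
      simp only [hgetlast, hgetx]
      have hmapne : l.map pvEmo ≠ [] := by simp [hlne]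
      have hmap : (l ++ [x]).map pvEmo = l.map pvEmo ++ [pvEmo x] := by simp
      rw [hmap, pvRuns_append _ _ hmapne]
      rw [List.getLast_map]
      unfold pvEmo
      split_ifs with h1 h2 <;> simp_all

-- ===== VERDICT (by name: the statement is the Claim_ definition above) =====
theorem analyze_emotion_shifts_py_spec : Claim_equal_analyze_emotion_shifts_py := by
  intro utterances _dom _pre
  unfold Spec_analyze_emotion_shifts_py analyze_emotion_shifts_py analyze_emotion_shifts_py_alt
  by_cases hle : utterances.length ≤ 1
  · rw [if_pos hle]
    have : PySem.List.pyRange 1 (utterances.length : Int) 1 = [] :=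
      PySem.List.pyRange_one_eq_nil (by omega)
    simp [this, PySem.Dict.empty, PySem.Dict.insert]
  · rw [if_neg hle]
    have hne : utterances ≠ [] := by
      intro h; subst h; simp at hle
    rw [pvFoldA utterances hne]
    have hemo : pvEmo = fun u => (PySem.Dict.mk u).getD "dominant_emotion" "" := rfl
    rw [hemo]
    simp [PySem.Dict.empty, PySem.Dict.insert]
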